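-- pv_equiv track=rewrite | github.com/loo-y/x-downloader | src/x_downloader/missav.py | choose_manifest_url
-- ===== SOURCE A (Python) =====
-- def choose_manifest_url(urls: list[str]) -> str | None:
--     filtered_urls = [url for url in urls if url]
--     if not filtered_urls:
--         return None
--     for url in filtered_urls:
--         if url.endswith("/playlist.m3u8"):
--             return url
--     return filtered_urls[0]
-- ===== SOURCE B (Python) =====
-- def choose_manifest_url(urls: list[str]) -> str | None:
--     candidates = [((0 if u.endswith("/playlist.m3u8") else 1, i), u)
--                   for i, u in enumerate(urls) if u]
--     if not candidates:
--         return None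
--     return min(candidates, key=lambda kv: kv[0])[1]
-- ===== Notes on version B (the rewrite author's own statement) =====
-- stated objective: alternative
-- what changed: B reduces the choice to a single keyed minimum: it builds ((0-if-playlist-else-1, index), url) candidates for the non-empty urls and returns min by that lexicographic key, instead of A's filter-then-scan-for-suffix-then-fallback-to-head.
import Mathlib
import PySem

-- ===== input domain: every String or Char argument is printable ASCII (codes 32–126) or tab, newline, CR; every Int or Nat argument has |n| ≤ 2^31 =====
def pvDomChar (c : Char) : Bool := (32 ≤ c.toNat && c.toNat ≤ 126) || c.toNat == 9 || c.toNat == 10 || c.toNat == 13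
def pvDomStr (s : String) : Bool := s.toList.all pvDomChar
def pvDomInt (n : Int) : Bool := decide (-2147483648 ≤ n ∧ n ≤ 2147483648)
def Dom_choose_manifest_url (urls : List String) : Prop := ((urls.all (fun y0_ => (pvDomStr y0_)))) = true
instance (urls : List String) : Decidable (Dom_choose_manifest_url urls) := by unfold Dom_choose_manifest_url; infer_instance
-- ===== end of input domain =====

-- B selects the answer as a single keyed minimum: min over ((priority, index), url) candidates
-- instead of A's filter-then-scan-then-fallback; objective: alternative algorithm, same cost.

-- ===== PORT A =====
def choose_manifest_url (urls : List String) : Option String :=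
  let filtered_urls := urls.filter (fun url => url ≠ "")
  if filtered_urls = [] then none
  else
    match filtered_urls.find? (fun url => PySem.Str.endswith url "/playlist.m3u8") with
    | some url => some url
    | none => PySem.List.pyGet? filtered_urls 0

-- ===== PORT B =====
-- ((0 if u.endswith(...) else 1, i), u)
def pvCandidate (i : Int) (u : String) : (Int × Int) × String :=
  ((if PySem.Str.endswith u "/playlist.m3u8" then 0 else 1, i), u)

def choose_manifest_url_alt (urls : List String) : Option String :=
  let candidates :=
    ((PySem.List.enumerate urls).filter (fun p => p.2 ≠ "")).map (fun p => pvCandidate p.1 p.2)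
  if candidates = [] then none
  else
    match PySem.List.min2? candidates (fun kv => kv.1.1) (fun kv => kv.1.2) with
    | some kv => some kv.2
    | none => none

-- ===== PRECONDITION & SPEC =====
def Spec_choose_manifest_url (urls : List String) (out : Option String) : Prop := out = choose_manifest_url_alt urls
instance (urls : List String) (out : Option String) : Decidable (Spec_choose_manifest_url urls out) := by unfold Spec_choose_manifest_url; infer_instance

-- ===== CLAIM (what is proved, stated in full; the proofs are below) =====
def Claim_equal_choose_manifest_url : Prop := ∀ (urls : List String), Dom_choose_manifest_url urls → Spec_choose_manifest_url urls (choose_manifest_url urls)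

-- ===== LEMMAS AND PROOFS =====

-- the candidate list over a suffix of urls, starting at index s
def pvCand (urls : List String) (s : Int) : List ((Int × Int) × String) :=
  ((PySem.List.enumerate urls s).filter (fun p => p.2 ≠ "")).map (fun p => pvCandidate p.1 p.2)

-- the min2? folding step, keys (kv.1.1, kv.1.2)
def pvStep (acc : Option ((Int × Int) × String)) (x : (Int × Int) × String) :
    Option ((Int × Int) × String) :=
  match acc with
  | none => some x
  | some m =>
    if (decide (x.1.1 < m.1.1) || !decide (m.1.1 < x.1.1) && decide (x.1.2 < m.1.2)) = true
    then some x else some m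

theorem min2?_eq_foldl_pvStep (cs : List ((Int × Int) × String)) :
    PySem.List.min2? cs (fun kv => kv.1.1) (fun kv => kv.1.2) = cs.foldl pvStep none := by
  simp only [PySem.List.min2?]
  congr 1
  funext acc x
  cases acc <;> rfl

theorem pvCand_nil (s : Int) : pvCand [] s = [] := rfl

theorem pvCand_cons (u : String) (rest : List String) (s : Int) :
    pvCand (u :: rest) s =
      (if u ≠ "" then [pvCandidate s u] else []) ++ pvCand rest (s + 1) := by
  by_cases h : u = "" <;>
    simp [pvCand, PySem.List.enumerate_cons, h]

-- a minimum with priority 0 and index below every remaining candidate is kept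
theorem foldl_keep (urls : List String) (s : Int) (m : (Int × Int) × String)
    (hlt : m.1.2 < s) (h0 : m.1.1 = 0) :
    (pvCand urls s).foldl pvStep (some m) = some m := by
  induction urls generalizing s with
  | nil => simp [pvCand_nil]
  | cons u rest ih =>
    rw [pvCand_cons]
    by_cases h : u = ""
    · simpa [h] using ih (s + 1) (by omega)
    · have hstep : pvStep (some m) (pvCandidate s u) = some m := by
        by_cases hw : PySem.Str.endswith u "/playlist.m3u8" = true
        · simp at hw; simp [pvStep, pvCandidate, h0, hw]; omega
        · simp at hw; simp [pvStep, pvCandidate, h0, hw]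
      simpa [h, hstep] using ih (s + 1) (by omega)

-- a minimum with priority 1 is replaced exactly by the first playlist candidate
theorem foldl_flag_one (urls : List String) (s : Int) (m : (Int × Int) × String)
    (hlt : m.1.2 < s) (h1 : m.1.1 = 1) :
    ((pvCand urls s).foldl pvStep (some m)).map (·.2) =
      match (urls.filter (fun url => url ≠ "")).find?
          (fun url => PySem.Str.endswith url "/playlist.m3u8") with
      | some u => some u
      | none => some m.2 := by
  induction urls generalizing s m with
  | nil => simp [pvCand_nil]
  | cons u rest ih =>
    rw [pvCand_cons]
    by_cases h : u = ""
    · simpa [h] using ih (s + 1) m (by omega) h1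
    · by_cases hw : PySem.Str.endswith u "/playlist.m3u8" = true <;> simp at hw
      · have hstep : pvStep (some m) (pvCandidate s u) = some (pvCandidate s u) := by
          simp [pvStep, pvCandidate, hw, h1]
        have hkeep := foldl_keep rest (s + 1) (pvCandidate s u)
          (by simp [pvCandidate]; try omega) (by simp [pvCandidate, hw])
        simp [pvCandidate, hw] at hstep hkeep
        simp [h, hw, pvCandidate, hstep, hkeep]
      · have hstep : pvStep (some m) (pvCandidate s u) = some m := by
          simp [pvStep, pvCandidate, h1, hw]
          omega
        simpa [h, hw, hstep] using ih (s + 1) m (by omega) h1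

-- starting from an empty accumulator
theorem foldl_none (urls : List String) (s : Int) :
    ((pvCand urls s).foldl pvStep none).map (·.2) =
      match (urls.filter (fun url => url ≠ "")).find?
          (fun url => PySem.Str.endswith url "/playlist.m3u8") with
      | some u => some u
      | none => (urls.filter (fun url => url ≠ "")).head? := by
  induction urls generalizing s with
  | nil => simp [pvCand_nil]
  | cons u rest ih =>
    rw [pvCand_cons]
    by_cases h : u = ""
    · simpa [h] using ih (s + 1)
    · by_cases hw : PySem.Str.endswith u "/playlist.m3u8" = true <;> simp at hw
      · have hkeep := foldl_keep rest (s + 1) (pvCandidate s u)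
          (by simp [pvCandidate]; try omega) (by simp [pvCandidate, hw])
        simp [pvCandidate, hw] at hkeep
        simp [h, hw, pvStep, hkeep, pvCandidate]
      · have hrec := foldl_flag_one rest (s + 1) (pvCandidate s u)
          (by simp [pvCandidate]; try omega) (by simp [pvCandidate, hw])
        simp [pvCandidate, hw] at hrec
        simp [h, hw, pvStep, hrec, pvCandidate]

theorem pvCand_eq_nil_iff (urls : List String) (s : Int) :
    pvCand urls s = [] ↔ urls.filter (fun url => url ≠ "") = [] := by
  induction urls generalizing s with
  | nil => simp [pvCand_nil]
  | cons u rest ih =>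
    rw [pvCand_cons]
    by_cases h : u = "" <;> simp [h, ih (s + 1)]

-- ===== VERDICT (by name: the statement is the Claim_ definition above) =====
theorem choose_manifest_url_spec : Claim_equal_choose_manifest_url := by
  intro urls _
  unfold Spec_choose_manifest_url
  simp only [choose_manifest_url, choose_manifest_url_alt]
  have hcand : ((PySem.List.enumerate urls).filter (fun p => p.2 ≠ "")).map
      (fun p => pvCandidate p.1 p.2) = pvCand urls 0 := rfl
  rw [hcand]
  rw [min2?_eq_foldl_pvStep (pvCand urls 0)]
  by_cases hnil : urls.filter (fun url => url ≠ "") = []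
  · rw [if_pos hnil, if_pos ((pvCand_eq_nil_iff urls 0).2 hnil)]
  · have hc : ¬ pvCand urls 0 = [] := fun h => hnil ((pvCand_eq_nil_iff urls 0).1 h)
    have hm := foldl_none urls 0
    simp only [if_neg hnil, if_neg hc]
    cases hf : (urls.filter (fun url => url ≠ "")).find?
        (fun url => PySem.Str.endswith url "/playlist.m3u8") with
    | some u =>
      simp only [hf] at hm ⊢
      cases hfold : (pvCand urls 0).foldl pvStep none with
      | none => simp [hfold] at hm
      | some kv => simp [hfold] at hm; simp [hm]
    | none =>
      simp only [hf] at hm ⊢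
      cases hl : urls.filter (fun url => url ≠ "") with
      | nil => exact absurd hl hnil
      | cons a l =>
        simp only [hl] at hm
        cases hfold : (pvCand urls 0).foldl pvStep none with
        | none => simp [hfold] at hm
        | some kv =>
          simp [hfold] at hm
          simp [hm, PySem.List.pyGet?, PySem.List.pyIdx?]
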